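-- pv_equiv track=rewrite | github.com/sschott20/Competitive-Programming | 914/A.py | solve
-- ===== SOURCE A (Python) =====
-- def solve(test):
--     a, b, xk, yk, xq, yq = test
--     acc = 0
--
--     delta = [(a, b), (-a, b), (a, -b), (-a, -b), (b, a), (-b, a), (b, -a), (-b, -a)]
--     if a == b:
--         delta = [(a, b), (-a, b), (a, -b), (-a, -b)]
--     king = []
--     queen = []
--     for d in delta:
--         king.append([xk + d[0], yk + d[1]])
--         queen.append([xq + d[0], yq + d[1]])
--     for k in king:
--         if k in queen:
--             acc += 1
--
--     return acc
-- ===== SOURCE B (Python) =====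
-- def solve(test):
--     a, b, xk, yk, xq, yq = test
--     if a == b:
--         delta = [(a, b), (-a, b), (a, -b), (-a, -b)]
--     else:
--         delta = [(a, b), (-a, b), (a, -b), (-a, -b), (b, a), (-b, a), (b, -a), (-b, -a)]
--     king = sorted((xk + dx, yk + dy) for dx, dy in delta)
--     queen = sorted((xq + dx, yq + dy) for dx, dy in delta)
--     acc = 0
--     i = j = 0
--     while i < len(king):
--         while j < len(queen) and queen[j] < king[i]:
--             j += 1
--         if j < len(queen) and queen[j] == king[i]:
--             acc += 1
--         i += 1
--     return acc
-- ===== Notes on version B (the rewrite author's own statement) =====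
-- stated objective: alternative
-- what changed: B replaces A's nested membership scan (for each king square, a linear 'in' scan of the queen list) by sorting both reachable-square lists and counting coincidences with a single two-pointer merge pass.
import Mathlib
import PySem

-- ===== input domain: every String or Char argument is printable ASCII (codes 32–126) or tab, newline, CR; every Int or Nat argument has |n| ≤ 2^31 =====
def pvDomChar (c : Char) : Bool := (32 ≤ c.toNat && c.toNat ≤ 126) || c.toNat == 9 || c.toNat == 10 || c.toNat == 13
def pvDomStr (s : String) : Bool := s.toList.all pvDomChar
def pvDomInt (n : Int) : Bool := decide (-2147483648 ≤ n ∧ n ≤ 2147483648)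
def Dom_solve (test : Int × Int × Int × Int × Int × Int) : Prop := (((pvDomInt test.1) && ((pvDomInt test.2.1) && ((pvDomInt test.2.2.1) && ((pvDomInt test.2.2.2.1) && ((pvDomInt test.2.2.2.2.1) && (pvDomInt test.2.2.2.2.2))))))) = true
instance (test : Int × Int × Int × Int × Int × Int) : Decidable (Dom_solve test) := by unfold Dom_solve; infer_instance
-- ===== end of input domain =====

-- B sorts both reachable-square lists and counts coincidences in one two-pointer merge
-- pass, instead of A's per-king-square linear membership scan of the queen list.

-- ===== PORT A =====
def solve (test : Int × Int × Int × Int × Int × Int) : Int :=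
  let (a, b, xk, yk, xq, yq) := test
  let delta0 : List (Int × Int) :=
    [(a, b), (-a, b), (a, -b), (-a, -b), (b, a), (-b, a), (b, -a), (-b, -a)]
  let delta : List (Int × Int) :=
    if a = b then [(a, b), (-a, b), (a, -b), (-a, -b)] else delta0
  -- one loop appending to both lists, as in A
  let kq := delta.foldl
    (fun (p : List (Int × Int) × List (Int × Int)) d =>
      (p.1 ++ [(xk + d.1, yk + d.2)], p.2 ++ [(xq + d.1, yq + d.2)]))
    ([], [])
  kq.1.foldl (fun acc k => if k ∈ kq.2 then acc + 1 else acc) 0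

-- ===== PORT B =====
-- Python's '<' on int pairs (tuple comparison): lexicographic.
def pairLt (p q : Int × Int) : Bool := p.1 < q.1 || (p.1 == q.1 && p.2 < q.2)

-- the two-pointer merge loop of Source B: i runs over 'king', j persists over 'queen'
-- (the inner 'while queen[j] < king[i]: j += 1' is the dropWhile; the suffix is kept)
def tpc : List (Int × Int) → List (Int × Int) → Int → Int
  | [], _, acc => acc
  | k :: ks, qs, acc =>
    let qs' := qs.dropWhile (fun q => pairLt q k)
    tpc ks qs' (acc + (match qs'.head? with
                       | some q => if q = k then 1 else 0
                       | none => 0))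

def solve_alt (test : Int × Int × Int × Int × Int × Int) : Int :=
  let (a, b, xk, yk, xq, yq) := test
  let delta : List (Int × Int) :=
    if a = b then [(a, b), (-a, b), (a, -b), (-a, -b)]
    else [(a, b), (-a, b), (a, -b), (-a, -b), (b, a), (-b, a), (b, -a), (-b, -a)]
  let king := PySem.List.sorted2 (delta.map (fun d => (xk + d.1, yk + d.2))) Prod.fst Prod.snd
  let queen := PySem.List.sorted2 (delta.map (fun d => (xq + d.1, yq + d.2))) Prod.fst Prod.snd
  tpc king queen 0

-- ===== PRECONDITION & SPEC =====
def Spec_solve (test : Int × Int × Int × Int × Int × Int) (out : Int) : Prop := out = solve_alt test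
instance (test : Int × Int × Int × Int × Int × Int) (out : Int) : Decidable (Spec_solve test out) := by unfold Spec_solve; infer_instance

-- ===== CLAIM (what is proved, stated in full; the proofs are below) =====
def Claim_equal_solve : Prop := ∀ (test : Int × Int × Int × Int × Int × Int), Dom_solve test → Spec_solve test (solve test)

-- ===== LEMMAS AND PROOFS =====

/-- `pairLt` is the strict lexicographic order on pairs. -/
theorem pairLt_iff (p q : Int × Int) : pairLt p q = true ↔ toLex p < toLex q := by
  rw [Prod.Lex.lt_iff]
  simp [pairLt]

/-- A's paired append loop builds the two mapped lists. -/
theorem foldl_pair_append (xk yk xq yq : Int) (l : List (Int × Int)) (k q : List (Int × Int)) :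
    l.foldl (fun (p : List (Int × Int) × List (Int × Int)) d =>
        (p.1 ++ [(xk + d.1, yk + d.2)], p.2 ++ [(xq + d.1, yq + d.2)])) (k, q)
      = (k ++ l.map (fun d => (xk + d.1, yk + d.2)), q ++ l.map (fun d => (xq + d.1, yq + d.2))) := by
  induction l generalizing k q with
  | nil => simp
  | cons x xs ih => simp [List.foldl, ih]

/-- `sorted2` with keys fst, snd produces a lexicographically nondecreasing list. -/
theorem sorted2_lex_pairwise (xs : List (Int × Int)) :
    (PySem.List.sorted2 xs Prod.fst Prod.snd false).Pairwise
      (fun a b => (toLex a : Lex (Int × Int)) ≤ toLex b) := by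
  have hbef : (fun a b : Int × Int =>
      (decide (a.1 < b.1) || (!decide (b.1 < a.1) && decide (a.2 < b.2))))
      = fun a b : Int × Int => decide ((toLex a : Lex (Int × Int)) < toLex b) := by
    funext a b
    rw [Bool.eq_iff_iff]
    simp only [Bool.or_eq_true, Bool.and_eq_true, Bool.not_eq_true', decide_eq_true_eq,
      decide_eq_false_iff_not, Prod.Lex.lt_iff]
    constructor
    · rintro (h | ⟨h1, h2⟩)
      · exact Or.inl h
      · rcases lt_or_ge a.1 b.1 with h' | h'
        · exact Or.inl h'
        · exact Or.inr ⟨le_antisymm (le_of_not_gt h1) h', h2⟩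
    · rintro (h | ⟨h1, h2⟩)
      · exact Or.inl h
      · exact Or.inr ⟨fun hlt => absurd h1 (ne_of_gt hlt), h2⟩
  show ((xs.foldl (fun acc x => PySem.List.insertBy _ x acc) []).Pairwise _)
  rw [hbef]
  have : ∀ (l acc : List (Int × Int)),
      acc.Pairwise (fun a b => (toLex a : Lex (Int × Int)) ≤ toLex b) →
      (l.foldl (fun acc x =>
          PySem.List.insertBy (fun a b => decide ((toLex a : Lex (Int × Int)) < toLex b)) x acc)
        acc).Pairwise (fun a b => (toLex a : Lex (Int × Int)) ≤ toLex b) := by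
    intro l
    induction l with
    | nil => intro acc h; exact h
    | cons x xs ih =>
        intro acc h
        exact ih _ (PySem.List.insertBy_pairwise_le (fun p : Int × Int => (toLex p : Lex (Int × Int))) x acc h)
  exact this xs [] List.Pairwise.nil

/-- The merge pass on sorted lists counts the king squares present among the queen squares. -/
theorem tpc_count (king : List (Int × Int)) : ∀ (qs : List (Int × Int)) (acc : Int),
    king.Pairwise (fun a b => (toLex a : Lex (Int × Int)) ≤ toLex b) →
    qs.Pairwise (fun a b => (toLex a : Lex (Int × Int)) ≤ toLex b) →
    tpc king qs acc = acc + (king.countP (fun x => decide (x ∈ qs)) : Int) := by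
  induction king with
  | nil => intro qs acc _ _; simp [tpc]
  | cons k ks ih =>
      intro qs acc hk hq
      rw [List.pairwise_cons] at hk
      obtain ⟨hkle, hks⟩ := hk
      set qs' := qs.dropWhile (fun q => pairLt q k) with hqs'
      -- dropped elements are lexicographically below k
      have hdropped : ∀ q ∈ qs.takeWhile (fun q => pairLt q k), toLex q < toLex k := by
        intro q hqmem
        exact (pairLt_iff q k).mp (List.mem_takeWhile_imp (p := fun q => pairLt q k) hqmem)
      have hsplit : qs.takeWhile (fun q => pairLt q k) ++ qs' = qs :=
        List.takeWhile_append_dropWhile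
      have hq' : qs'.Pairwise (fun a b => (toLex a : Lex (Int × Int)) ≤ toLex b) :=
        hq.sublist (List.dropWhile_sublist _)
      -- membership of any x with toLex k ≤ toLex x is unaffected by the drop
      have hmem : ∀ x : Int × Int, (toLex k : Lex (Int × Int)) ≤ toLex x → (x ∈ qs ↔ x ∈ qs') := by
        intro x hx
        constructor
        · intro hxqs
          rw [← hsplit] at hxqs
          rcases List.mem_append.mp hxqs with h | h
          · exact absurd (lt_of_lt_of_le (hdropped x h) hx) (lt_irrefl _)
          · exact h
        · intro h; rw [← hsplit]; exact List.mem_append.mpr (Or.inr h)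
      -- the head test is exactly the membership test for k in qs'
      have hhead : (match qs'.head? with
                    | some q => if q = k then (1 : Int) else 0
                    | none => 0) = if k ∈ qs' then (1 : Int) else 0 := by
        have hnot := List.head?_dropWhile_not (fun q => pairLt q k) qs
        rw [← hqs'] at hnot
        cases hqsc : qs' with
        | nil => simp
        | cons q t =>
            rw [hqsc] at hnot
            simp only [List.head?_cons] at hnot
            by_cases hqk : q = k
            · simp [hqk]
            · have hkq : (toLex k : Lex (Int × Int)) < toLex q := by
                rcases lt_trichotomy (toLex k : Lex (Int × Int)) (toLex q) with h | h | h
                · exact h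
                · exact absurd (congrArg ofLex h) (fun he => hqk (by simpa using he.symm))
                · exact absurd ((pairLt_iff q k).mpr h) (by simp [hnot])
              have : k ∉ q :: t := by
                intro hmem'
                rcases List.mem_cons.mp hmem' with h | h
                · exact hqk h.symm
                · rw [hqsc] at hq'
                  rw [List.pairwise_cons] at hq'
                  exact absurd (lt_of_lt_of_le hkq (hq'.1 k h)) (lt_irrefl _)
              simp [hqk, this]
      -- subsequent king squares see the same membership in qs and qs'
      have hcnt : ks.countP (fun x => decide (x ∈ qs')) = ks.countP (fun x => decide (x ∈ qs)) :=
        List.countP_congr (fun x hx => by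
          simp only [decide_eq_true_eq]
          exact (hmem x (hkle x hx)).symm)
      have hmemk := hmem k le_rfl
      rw [show tpc (k :: ks) qs acc = tpc ks qs'
            (acc + (match qs'.head? with
                    | some q => if q = k then (1 : Int) else 0
                    | none => 0)) from rfl]
      rw [ih qs' _ hks hq', hhead, hcnt, List.countP_cons]
      by_cases hk' : k ∈ qs
      · rw [if_pos (hmemk.mp hk'), if_pos (by simpa using hk')]
        push_cast
        ring
      · rw [if_neg (fun h => hk' (hmemk.mpr h)), if_neg (by simpa using hk')]
        push_cast
        ring

/-- Sorting both lists changes neither the counted list nor the membership test. -/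
theorem count_sorted (Km Qm : List (Int × Int)) :
    List.countP (fun x => decide (x ∈ PySem.List.sorted2 Qm Prod.fst Prod.snd false))
        (PySem.List.sorted2 Km Prod.fst Prod.snd false)
      = List.countP (fun x => decide (x ∈ Qm)) Km := by
  rw [List.Perm.countP_eq _ (PySem.List.sorted2_perm Km Prod.fst Prod.snd false)]
  exact List.countP_congr (fun x _ => by
    simp [List.Perm.mem_iff (PySem.List.sorted2_perm Qm Prod.fst Prod.snd false)])

/-- A's counting fold is a countP of membership. -/
theorem foldl_mem_count (K Q : List (Int × Int)) (acc : Int) :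
    K.foldl (fun acc k => if k ∈ Q then acc + 1 else acc) acc
      = acc + (K.countP (fun x => decide (x ∈ Q)) : Int) := by
  rw [PySem.List.foldl_ite_add_one (fun k => k ∈ Q) K acc]

-- ===== VERDICT (by name: the statement is the Claim_ definition above) =====
theorem solve_spec : Claim_equal_solve := by
  intro test _
  obtain ⟨a, b, xk, yk, xq, yq⟩ := test
  unfold Spec_solve solve solve_alt
  simp only
  rw [apply_ite (f := fun l : List (Int × Int) =>
        l.foldl (fun (p : List (Int × Int) × List (Int × Int)) d =>
          (p.1 ++ [(xk + d.1, yk + d.2)], p.2 ++ [(xq + d.1, yq + d.2)])) ([], []))]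
  split
  all_goals
  · rw [foldl_pair_append xk yk xq yq]
    simp only [List.nil_append]
    refine (foldl_mem_count _ _ 0).trans ?_
    rw [tpc_count _ _ _ (sorted2_lex_pairwise _) (sorted2_lex_pairwise _), count_sorted]
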